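-- pv_equiv track=rewrite | github.com/wusui/chess_career | utilities.py | material
-- ===== SOURCE A (Python) =====
-- CURRENT_POSITION = "CurrentPosition"
--
-- PNAMES = "pnbrq"
--
-- POINTS = [1, 3, 3, 5, 9]
--
-- def material(game):
--     """
--     Given a game, return a material count
--
--     Args:
--         game -- game data
--
--     returns a material difference. Positive if white is ahead.
--     Negative if black is ahead.
--     """
--     value = 0
--     fen_text = game[CURRENT_POSITION].split(" ")[0]
--     for cchar in fen_text:
--         pvalue = PNAMES.find(cchar.lower())
--         if pvalue >= 0:
--             if cchar.islower():
--                 value -= POINTS[pvalue]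
--             else:
--                 value += POINTS[pvalue]
--     return value
-- ===== SOURCE B (Python) =====
-- CURRENT_POSITION = "CurrentPosition"
--
-- PNAMES = "pnbrq"
--
-- POINTS = [1, 3, 3, 5, 9]
--
-- def material(game):
--     """Material difference (white positive), computed from a frequency table
--     of the board field instead of branching on every character."""
--     fen_text = game[CURRENT_POSITION].split(" ")[0]
--     counts = {}
--     for cchar in fen_text:
--         counts[cchar] = counts.get(cchar, 0) + 1
--     total = 0
--     for pts, low, up in zip(POINTS, PNAMES, PNAMES.upper()):
--         total += pts * (counts.get(up, 0) - counts.get(low, 0))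
--     return total
-- ===== Notes on version B (the rewrite author's own statement) =====
-- stated objective: alternative
-- what changed: B builds a character-frequency dictionary of the board field in one pass and then sums POINTS[i]*(count(upper)-count(lower)) over the five piece kinds, instead of scanning each character and branching on find/islower per character.
import Mathlib
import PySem

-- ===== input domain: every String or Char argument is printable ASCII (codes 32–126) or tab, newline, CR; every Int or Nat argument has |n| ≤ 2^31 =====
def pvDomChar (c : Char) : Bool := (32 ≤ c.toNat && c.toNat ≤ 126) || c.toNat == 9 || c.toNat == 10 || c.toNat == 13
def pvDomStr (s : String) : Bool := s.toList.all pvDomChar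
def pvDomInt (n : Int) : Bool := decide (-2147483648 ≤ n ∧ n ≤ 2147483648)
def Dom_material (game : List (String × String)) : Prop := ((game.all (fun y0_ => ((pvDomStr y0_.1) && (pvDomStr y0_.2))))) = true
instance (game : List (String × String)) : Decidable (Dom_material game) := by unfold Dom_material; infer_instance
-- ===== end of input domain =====

-- B replaces A's per-character branching scan by a frequency table of the board field
-- summed over the five piece kinds (alternative decomposition, same cost).


-- ===== PORT A =====
-- game[CURRENT_POSITION] on a missing key raises KeyError (the `none` arm; excluded by Pre_).
-- split(" ") with a nonempty separator always yields a nonempty list, so `[0]` is `headD ""`.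
def material (game : List (String × String)) : Int :=
  match game.lookup "CurrentPosition" with
  | none => 0
  | some pos =>
    let fen_text := ((PySem.Str.split? pos " ").getD []).headD ""
    fen_text.toList.foldl (fun value cchar =>
      let pvalue := PySem.Chars.find "pnbrq".toList [PySem.Chars.lowerChar cchar]
      if pvalue ≥ 0 then
        if PySem.Chars.islower cchar then
          value - (PySem.List.pyGet? [1, 3, 3, 5, 9] pvalue).getD 0
        else
          value + (PySem.List.pyGet? [1, 3, 3, 5, 9] pvalue).getD 0
      else value) 0

-- ===== PORT B =====
def material_alt (game : List (String × String)) : Int :=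
  match game.lookup "CurrentPosition" with
  | none => 0
  | some pos =>
    let fen_text := ((PySem.Str.split? pos " ").getD []).headD ""
    let counts := fen_text.toList.foldl (fun d x => d.insert x (d.getD x 0 + 1)) PySem.Dict.empty
    (List.zip [(1:Int), 3, 3, 5, 9] (List.zip "pnbrq".toList (PySem.Str.upper "pnbrq").toList)).foldl
      (fun total t => total + t.1 * (counts.getD t.2.2 0 - counts.getD t.2.1 0)) 0

-- ===== PRECONDITION & SPEC =====
-- Pre_ excludes only dicts missing the "CurrentPosition" key, where A raises KeyError (B too).
def Pre_material (game : List (String × String)) : Prop :=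
  (game.lookup "CurrentPosition").isSome = true
instance (game : List (String × String)) : Decidable (Pre_material game) := by
  unfold Pre_material; infer_instance

def pvWitness_material : (List (String × String)) :=
  [("CurrentPosition", "rnbqkbnr/pppppppp/8/8/8/8/PPPPPPPP/RNBQKBNR w KQkq - 0 1")]

def Spec_material (game : List (String × String)) (out : Int) : Prop := out = material_alt game
instance (game : List (String × String)) (out : Int) : Decidable (Spec_material game out) := by
  unfold Spec_material; infer_instance

-- ===== CLAIM (what is proved, stated in full; the proofs are below) =====
def Claim_equal_material : Prop := ∀ (game : List (String × String)), Dom_material game → Pre_material game → Spec_material game (material game)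

-- ===== LEMMAS AND PROOFS =====

theorem charLe_iff (a b : Char) : a ≤ b ↔ a.toNat ≤ b.toNat := Iff.rfl

theorem char_toNat_inj (a b : Char) (h : a.toNat = b.toNat) : a = b := by
  apply Char.ext; unfold Char.toNat at h; exact UInt32.toNat_inj.mp h

theorem lowerChar_eq_iff (c L U : Char) (hL : 97 ≤ L.toNat) (hL2 : L.toNat ≤ 122)
    (hU : U.toNat + 32 = L.toNat) :
    PySem.Chars.lowerChar c = L ↔ (c = L ∨ c = U) := by
  unfold PySem.Chars.lowerChar PySem.Chars.isupper
  have hA : ('A':Char).toNat = 65 := rfl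
  have hZ : ('Z':Char).toNat = 90 := rfl
  split_ifs with h
  · simp only [Bool.and_eq_true, decide_eq_true_eq, charLe_iff, hA, hZ] at h
    have hval : (c.toNat + 32).isValidChar := Or.inl (by omega)
    have ht : (Char.ofNat (c.toNat + 32)).toNat = c.toNat + 32 := by
      rw [Char.toNat_ofNat, if_pos hval]
    constructor
    · intro he
      right
      apply char_toNat_inj
      have := congrArg Char.toNat he
      omega
    · rintro (rfl | rfl)
      · omega
      · apply char_toNat_inj; omega
  · simp only [Bool.and_eq_true, decide_eq_true_eq, charLe_iff, hA, hZ, not_and_or, not_le] at h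
    constructor
    · exact Or.inl
    · rintro (rfl | rfl)
      · rfl
      · omega

/-- A's per-character step, started from 0. -/
def deltaA (cchar : Char) : Int :=
  let pvalue := PySem.Chars.find "pnbrq".toList [PySem.Chars.lowerChar cchar]
  if pvalue ≥ 0 then
    if PySem.Chars.islower cchar then
      - (PySem.List.pyGet? [1, 3, 3, 5, 9] pvalue).getD 0
    else
      (PySem.List.pyGet? [1, 3, 3, 5, 9] pvalue).getD 0
  else 0

theorem find_singleton (x : Char) :
    PySem.Chars.find ['p','n','b','r','q'] [x] =
      if x = 'p' then 0 else if x = 'n' then 1 else if x = 'b' then 2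
      else if x = 'r' then 3 else if x = 'q' then 4 else -1 := by
  simp [PySem.Chars.find, PySem.Chars.find.go, List.isPrefixOf]

/-- indicator used in the count decomposition -/
def ind (c u : Char) : Int := if c = u then 1 else 0

theorem deltaA_char (c : Char) :
    deltaA c = 1 * (ind c 'P' - ind c 'p') + 3 * (ind c 'N' - ind c 'n')
      + 3 * (ind c 'B' - ind c 'b') + 5 * (ind c 'R' - ind c 'r')
      + 9 * (ind c 'Q' - ind c 'q') := by
  by_cases h1 : c = 'p'; · subst h1; decide
  by_cases h2 : c = 'P'; · subst h2; decide
  by_cases h3 : c = 'n'; · subst h3; decide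
  by_cases h4 : c = 'N'; · subst h4; decide
  by_cases h5 : c = 'b'; · subst h5; decide
  by_cases h6 : c = 'B'; · subst h6; decide
  by_cases h7 : c = 'r'; · subst h7; decide
  by_cases h8 : c = 'R'; · subst h8; decide
  by_cases h9 : c = 'q'; · subst h9; decide
  by_cases h10 : c = 'Q'; · subst h10; decide
  have np : PySem.Chars.lowerChar c ≠ 'p' := fun he =>
    ((lowerChar_eq_iff c 'p' 'P' (by decide) (by decide) (by decide)).mp he).elim h1 h2
  have nn : PySem.Chars.lowerChar c ≠ 'n' := fun he =>
    ((lowerChar_eq_iff c 'n' 'N' (by decide) (by decide) (by decide)).mp he).elim h3 h4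
  have nb : PySem.Chars.lowerChar c ≠ 'b' := fun he =>
    ((lowerChar_eq_iff c 'b' 'B' (by decide) (by decide) (by decide)).mp he).elim h5 h6
  have nr : PySem.Chars.lowerChar c ≠ 'r' := fun he =>
    ((lowerChar_eq_iff c 'r' 'R' (by decide) (by decide) (by decide)).mp he).elim h7 h8
  have nq : PySem.Chars.lowerChar c ≠ 'q' := fun he =>
    ((lowerChar_eq_iff c 'q' 'Q' (by decide) (by decide) (by decide)).mp he).elim h9 h10
  have hfind : PySem.Chars.find "pnbrq".toList [PySem.Chars.lowerChar c] = -1 := by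
    have e : "pnbrq".toList = ['p','n','b','r','q'] := by decide
    rw [e, find_singleton, if_neg np, if_neg nn, if_neg nb, if_neg nr, if_neg nq]
  simp only [deltaA, hfind, ind]
  norm_num
  simp only [if_neg h1, if_neg h2, if_neg h3, if_neg h4, if_neg h5, if_neg h6,
    if_neg h7, if_neg h8, if_neg h9, if_neg h10]
  ring

theorem lhs_eq (cs : List Char) :
    cs.foldl (fun value cchar =>
      let pvalue := PySem.Chars.find "pnbrq".toList [PySem.Chars.lowerChar cchar]
      if pvalue ≥ 0 then
        if PySem.Chars.islower cchar then
          value - (PySem.List.pyGet? [1, 3, 3, 5, 9] pvalue).getD 0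
        else
          value + (PySem.List.pyGet? [1, 3, 3, 5, 9] pvalue).getD 0
      else value) 0 = 0 + (cs.map deltaA).sum := by
  rw [PySem.List.foldl_congr_mem cs _ (fun acc x => acc + deltaA x) 0
      (by intro acc x _; simp only [deltaA]; split_ifs <;> ring),
    PySem.List.foldl_add]

theorem sum_delta (cs : List Char) :
    (cs.map deltaA).sum
      = 1 * ((cs.count 'P' : Int) - (cs.count 'p' : Int)) + 3 * ((cs.count 'N' : Int) - (cs.count 'n' : Int))
      + 3 * ((cs.count 'B' : Int) - (cs.count 'b' : Int)) + 5 * ((cs.count 'R' : Int) - (cs.count 'r' : Int))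
      + 9 * ((cs.count 'Q' : Int) - (cs.count 'q' : Int)) := by
  induction cs with
  | nil => simp
  | cons c cs ih =>
    rw [List.map_cons, List.sum_cons, deltaA_char c, ih]
    simp only [List.count_cons, ind, beq_iff_eq]
    push_cast [apply_ite (Nat.cast : ℕ → ℤ)]
    ring

theorem core (cs : List Char) :
    cs.foldl (fun value cchar =>
      let pvalue := PySem.Chars.find "pnbrq".toList [PySem.Chars.lowerChar cchar]
      if pvalue ≥ 0 then
        if PySem.Chars.islower cchar then
          value - (PySem.List.pyGet? [1, 3, 3, 5, 9] pvalue).getD 0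
        else
          value + (PySem.List.pyGet? [1, 3, 3, 5, 9] pvalue).getD 0
      else value) 0
    = (List.zip [(1:Int), 3, 3, 5, 9] (List.zip "pnbrq".toList (PySem.Str.upper "pnbrq").toList)).foldl
      (fun total t => total +
        t.1 * ((cs.foldl (fun d x => d.insert x (d.getD x 0 + 1)) PySem.Dict.empty).getD t.2.2 0
             - (cs.foldl (fun d x => d.insert x (d.getD x 0 + 1)) PySem.Dict.empty).getD t.2.1 0)) 0 := by
  rw [lhs_eq, PySem.Dict.foldl_insert_getD_add_one_eq_counter]
  have hz : (List.zip [(1:Int), 3, 3, 5, 9] (List.zip "pnbrq".toList (PySem.Str.upper "pnbrq").toList))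
      = [(1,('p','P')), (3,('n','N')), (3,('b','B')), (5,('r','R')), (9,('q','Q'))] := by decide
  rw [hz]
  simp only [List.foldl_cons, List.foldl_nil, PySem.Dict.getD_counter]
  rw [sum_delta]
  ring

-- ===== VERDICT (by name: the statement is the Claim_ definition above) =====
theorem material_spec : Claim_equal_material := by
  intro game _ hpre
  unfold Spec_material material material_alt
  unfold Pre_material at hpre
  cases h : game.lookup "CurrentPosition" with
  | none => simp [h] at hpre
  | some pos =>
    exact core _
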